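-- pv_equiv track=rewrite | github.com/desafin/Resource-Monitor-pyQT | utils/process_tree.py | build_process_tree
-- ===== SOURCE A (Python) =====
-- from collections import defaultdict
--
-- def build_process_tree(processes: list[dict]) -> list[dict]:
--     """평탄한 프로세스 목록을 트리 순서로 재배열합니다.
--
--     ppid 관계를 기반으로 부모-자식 트리를 구성하고,
--     깊이 우선 순회(DFS) 순서로 프로세스를 정렬합니다.
--     각 프로세스에 indent_level 키가 추가됩니다.
--
--     Args:
--         processes: ppid 키를 포함한 프로세스 딕셔너리 목록.
--
--     Returns:
--         indent_level 키가 추가된 트리 순서의 프로세스 목록.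
--     """
--     if not processes:
--         return []
--
--     # pid -> 프로세스 매핑
--     pid_map: dict[int, dict] = {}
--     for proc in processes:
--         pid_map[proc["pid"]] = proc
--
--     # ppid -> 자식 프로세스 목록 매핑
--     children: dict[int, list[dict]] = defaultdict(list)
--     roots: list[dict] = []
--
--     for proc in processes:
--         ppid = proc.get("ppid", 0)
--         if ppid in pid_map and ppid != proc["pid"]:
--             children[ppid].append(proc)
--         else:
--             # 부모가 목록에 없거나 자기 자신이 부모인 경우 루트로 취급
--             roots.append(proc)
--
--     # 깊이 우선 순회로 트리 순서 생성
--     result: list[dict] = []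
--
--     def _dfs(node: dict, level: int) -> None:
--         """깊이 우선 순회로 프로세스를 트리 순서로 추가합니다."""
--         node_copy = dict(node)
--         node_copy["indent_level"] = level
--         result.append(node_copy)
--         # 자식을 PID 순으로 정렬하여 안정적인 순서 보장
--         for child in sorted(children.get(node["pid"], []), key=lambda p: p["pid"]):
--             _dfs(child, level + 1)
--
--     # 루트 프로세스부터 시작 (PID 순)
--     for root in sorted(roots, key=lambda p: p["pid"]):
--         _dfs(root, 0)
--
--     return result
-- ===== SOURCE B (Python) =====
-- def build_process_tree(processes: list[dict]) -> list[dict]: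
--     """Tree-order the processes: a pid set + filter-based children lookup (no pid->proc
--     dict, no prebuilt children buckets) driving an explicit stack-based DFS."""
--     pids = {p["pid"] for p in processes}
--
--     def kids(pid):
--         return [p for p in processes if p.get("ppid", 0) == pid and p["pid"] != pid]
--
--     roots = [p for p in processes
--              if p.get("ppid", 0) not in pids or p.get("ppid", 0) == p["pid"]]
--
--     result = []
--     stack = [(r, 0) for r in sorted(roots, key=lambda p: p["pid"], reverse=True)]
--     while stack:
--         node, level = stack.pop()
--         result.append({**node, "indent_level": level})
--         for c in sorted(kids(node["pid"]), key=lambda p: p["pid"], reverse=True):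
--             stack.append((c, level + 1))
--     return result
-- ===== Notes on version B (the rewrite author's own statement) =====
-- stated objective: alternative
-- what changed: B drops A's pid->proc dict and prebuilt children buckets: a plain pid set plus on-demand filter-based children/roots comprehensions feed an explicit stack-based iterative DFS instead of A's recursive _dfs over a defaultdict.
import Mathlib
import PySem

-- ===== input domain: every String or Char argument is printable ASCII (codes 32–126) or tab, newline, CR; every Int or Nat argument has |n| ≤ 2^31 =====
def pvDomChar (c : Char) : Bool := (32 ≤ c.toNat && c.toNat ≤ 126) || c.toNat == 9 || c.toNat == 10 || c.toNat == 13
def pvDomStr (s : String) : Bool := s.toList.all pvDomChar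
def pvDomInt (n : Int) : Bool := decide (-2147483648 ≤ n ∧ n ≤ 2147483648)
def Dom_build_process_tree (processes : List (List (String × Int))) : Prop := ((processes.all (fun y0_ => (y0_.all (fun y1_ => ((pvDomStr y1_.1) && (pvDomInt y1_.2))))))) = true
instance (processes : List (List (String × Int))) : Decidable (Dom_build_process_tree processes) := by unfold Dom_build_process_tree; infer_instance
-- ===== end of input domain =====

-- B drops A's pid->proc dict and prebuilt children buckets: a pid set plus on-demand
-- filter-based children/roots, driving an explicit stack-based DFS instead of A's recursion.
-- Equivalence is about the RETURN value (neither program mutates its argument).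

-- ===== PORT A =====
-- shared accessors: proc["pid"] (Pre_ guarantees the key is present), proc.get("ppid", 0),
-- and the copy `dict(node)` + `node_copy["indent_level"] = level`
def pvPid (p : List (String × Int)) : Int := (PySem.Dict.mk p).getD "pid" 0
def pvPpid (p : List (String × Int)) : Int := (PySem.Dict.mk p).getD "ppid" 0
def pvCopy (p : List (String × Int)) (level : Int) : List (String × Int) :=
  ((PySem.Dict.mk p).insert "indent_level" level).items

-- the `_dfs` recursion of A, made total by a threaded fuel (one unit per visited node;
-- `min st.1 f` only caps the threaded fuel for termination — st.1 ≤ f always holds, see pvDfsA_fst_le)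
def pvDfsA (children : PySem.Dict Int (List (List (String × Int)))) :
    Nat → List (String × Int) → Int → List (List (String × Int)) → Nat × List (List (String × Int))
  | 0, _, _, acc => (0, acc)
  | f+1, node, level, acc =>
      (PySem.List.sorted (children.getD (pvPid node) []) pvPid false).foldl
        (fun st c => pvDfsA children (min st.1 f) c (level + 1) st.2)
        (f, acc ++ [pvCopy node level])
termination_by f => f
decreasing_by omega

def build_process_tree (processes : List (List (String × Int))) : List (List (String × Int)) :=
  if processes = [] then [] else
  let pid_map := processes.foldl (fun d p => d.insert (pvPid p) p) PySem.Dict.empty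
  let cr := processes.foldl
    (fun (cr : PySem.Dict Int (List (List (String × Int))) × List (List (String × Int))) p =>
      let pp := pvPpid p
      if pid_map.contains pp = true ∧ pp ≠ pvPid p then (cr.1.modify pp [] (· ++ [p]), cr.2)
      else (cr.1, cr.2 ++ [p]))
    (PySem.Dict.empty, [])
  ((PySem.List.sorted cr.2 pvPid false).foldl
      (fun st r => pvDfsA cr.1 st.1 r 0 st.2) (4 ^ processes.length + 1, [])).2

-- ===== PORT B =====
-- kids(pid): the on-demand list comprehension `[p for p in processes if p.get("ppid",0)==pid and p["pid"]!=pid]`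
def pvKids (processes : List (List (String × Int))) (k : Int) : List (List (String × Int)) :=
  processes.filter (fun p => pvPpid p == k && pvPid p != k)

-- the while-loop of B: stack with top at the head (Python append/pop at the end of the list);
-- fuel counts pops, one per emitted node
def pvLoopB (processes : List (List (String × Int))) :
    Nat → List (List (String × Int) × Int) → List (List (String × Int)) → List (List (String × Int))
  | 0, _, res => res
  | _+1, [], res => res
  | f+1, (node, level) :: rest, res =>
      pvLoopB processes f
        ((PySem.List.sorted (pvKids processes (pvPid node)) pvPid true).foldl
          (fun st c => (c, level + 1) :: st) rest)
        (res ++ [pvCopy node level])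

def build_process_tree_alt (processes : List (List (String × Int))) : List (List (String × Int)) :=
  let pids : PySem.Set Int := PySem.Set.ofList (processes.map pvPid)
  let roots := processes.filter
    (fun p => !(PySem.Set.contains pids (pvPpid p)) || pvPpid p == pvPid p)
  pvLoopB processes (4 ^ processes.length + 1)
    ((PySem.List.sorted roots pvPid true).foldl (fun st r => (r, (0 : Int)) :: st) []) []

-- ===== PRECONDITION & SPEC =====
-- Pre_ excludes processes missing the "pid" key (A raises KeyError) and lists where two
-- DIFFERENT process dicts share a pid, on which A's last-pid-wins pid_map, shared children
-- buckets and stable tie order are accidental (a duplicate-pid cycle can even send A into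
-- unbounded recursion); exact duplicate entries are allowed.
def Pre_build_process_tree (processes : List (List (String × Int))) : Prop :=
  (processes.all (fun p => (PySem.Dict.mk p).contains "pid")) = true ∧
  processes.Pairwise (fun p q => pvPid p = pvPid q → p = q)
instance (processes : List (List (String × Int))) : Decidable (Pre_build_process_tree processes) := by
  unfold Pre_build_process_tree; infer_instance

def pvWitness_build_process_tree : (List (List (String × Int))) :=
  [[("pid", 1), ("ppid", 0)], [("pid", 2), ("ppid", 1)], [("pid", 3), ("ppid", 1)]]

def Spec_build_process_tree (processes : List (List (String × Int))) (out : List (List (String × Int))) : Prop := out = build_process_tree_alt processes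
instance (processes : List (List (String × Int))) (out : List (List (String × Int))) : Decidable (Spec_build_process_tree processes out) := by unfold Spec_build_process_tree; infer_instance

-- ===== CLAIM (what is proved, stated in full; the proofs are below) =====
def Claim_equal_build_process_tree : Prop := ∀ (processes : List (List (String × Int))), Dom_build_process_tree processes → Pre_build_process_tree processes → Spec_build_process_tree processes (build_process_tree processes)

-- ===== LEMMAS AND PROOFS =====

-- fold of pvDfsA over a list of (node, level) entries, threading (fuel, result)
def pvSeqA (children : PySem.Dict Int (List (List (String × Int))))
    (st : Nat × List (List (String × Int))) (entries : List (List (String × Int) × Int)) :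
    Nat × List (List (String × Int)) :=
  entries.foldl (fun st e => pvDfsA children st.1 e.1 e.2 st.2) st

theorem pvDfsA_fst_le (children : PySem.Dict Int (List (List (String × Int)))) :
    ∀ (f : Nat) (n : List (String × Int)) (l : Int) (acc : List (List (String × Int))),
      (pvDfsA children f n l acc).1 ≤ f := by
  intro f
  induction f using Nat.strong_induction_on with
  | _ f ih =>
    match f with
    | 0 => intro n l acc; rw [pvDfsA]
    | f+1 =>
      intro n l acc
      rw [pvDfsA]
      have aux : ∀ (xs : List (List (String × Int))) (st : Nat × List (List (String × Int))),
          st.1 ≤ f →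
          (xs.foldl (fun st c => pvDfsA children (min st.1 f) c (l + 1) st.2) st).1 ≤ f := by
        intro xs
        induction xs with
        | nil => intro st h; exact h
        | cons x xs ihx =>
          intro st h
          refine ihx _ ?_
          calc (pvDfsA children (min st.1 f) x (l + 1) st.2).1 ≤ min st.1 f :=
                ih (min st.1 f) (by omega) x (l + 1) st.2
            _ ≤ f := by omega
      exact le_trans (aux _ (f, acc ++ [pvCopy n l]) (le_refl f)) (by omega)

-- unfolding of pvDfsA at positive fuel, with the `min` cap removed and the fold rephrased over entries
theorem pvDfsA_succ (children : PySem.Dict Int (List (List (String × Int))))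
    (f : Nat) (n : List (String × Int)) (l : Int) (acc : List (List (String × Int))) :
    pvDfsA children (f+1) n l acc =
      pvSeqA children (f, acc ++ [pvCopy n l])
        ((PySem.List.sorted (children.getD (pvPid n) []) pvPid false).map (fun c => (c, l + 1))) := by
  rw [pvDfsA]
  unfold pvSeqA
  rw [List.foldl_map]
  have aux : ∀ (xs : List (List (String × Int))) (st : Nat × List (List (String × Int))),
      st.1 ≤ f →
      xs.foldl (fun st c => pvDfsA children (min st.1 f) c (l + 1) st.2) st =
      xs.foldl (fun st c => pvDfsA children st.1 c (l + 1) st.2) st := by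
    intro xs
    induction xs with
    | nil => intro st h; rfl
    | cons x xs ihx =>
      intro st h
      simp only [List.foldl_cons, Nat.min_eq_left h]
      exact ihx _ (le_trans (pvDfsA_fst_le children st.1 x (l + 1) st.2) h)
  exact aux _ (f, acc ++ [pvCopy n l]) (le_refl f)

theorem pvSeqA_zero (children : PySem.Dict Int (List (List (String × Int))))
    (acc : List (List (String × Int))) (entries : List (List (String × Int) × Int)) :
    pvSeqA children (0, acc) entries = (0, acc) := by
  induction entries with
  | nil => rfl
  | cons e es ih =>
    unfold pvSeqA at *
    rw [List.foldl_cons]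
    have h0 : pvDfsA children 0 e.1 e.2 acc = (0, acc) := by rw [pvDfsA]
    rw [h0, ih]

theorem foldl_cons_rev {α β : Type} (xs : List α) (g : α → β) (rest : List β) :
    xs.foldl (fun st c => g c :: st) rest = (xs.map g).reverse ++ rest := by
  induction xs generalizing rest with
  | nil => simp
  | cons x xs ih => simp [List.foldl_cons, ih]

theorem sorted_true_eq_reverse (xs : List (List (String × Int)))
    (h : ∀ a ∈ xs, ∀ b ∈ xs, pvPid a = pvPid b → a = b) :
    PySem.List.sorted xs pvPid true = (PySem.List.sorted xs pvPid false).reverse := by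
  have p1 : (PySem.List.sorted xs pvPid true).Perm xs := PySem.List.sorted_perm xs pvPid true
  have p2 : ((PySem.List.sorted xs pvPid false).reverse).Perm xs :=
    (List.reverse_perm _).trans (PySem.List.sorted_perm xs pvPid false)
  refine List.Perm.eq_of_pairwise (le := fun a b => pvPid b ≤ pvPid a) ?_ ?_ ?_ (p1.trans p2.symm)
  · intro a b ha hb h1 h2
    exact h a (p1.mem_iff.1 ha) b (p2.mem_iff.1 hb) (le_antisymm h2 h1)
  · exact PySem.List.sorted_pairwise_rev xs pvPid
  · exact List.pairwise_reverse.2 (PySem.List.sorted_pairwise xs pvPid)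

-- A's pid_map has exactly the pids of `processes` as keys
theorem contains_foldl_insert :
    ∀ (ps : List (List (String × Int))) (d : PySem.Dict Int (List (String × Int))) (k : Int),
      (ps.foldl (fun d p => d.insert (pvPid p) p) d).contains k =
        (d.contains k || decide (k ∈ ps.map pvPid)) := by
  intro ps
  induction ps with
  | nil => intro d k; simp
  | cons p ps ih =>
    intro d k
    rw [List.foldl_cons, ih, PySem.Dict.contains_insert]
    simp only [List.map_cons, List.mem_cons]
    cases d.contains k <;> cases h1 : (k == pvPid p) <;> simp_all

-- the classification fold: bucket contents and roots are filters of `processes`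
theorem classify_getD (pid_map : PySem.Dict Int (List (String × Int))) :
    ∀ (ps : List (List (String × Int)))
      (c : PySem.Dict Int (List (List (String × Int)))) (r : List (List (String × Int))) (k : Int),
      ((ps.foldl
        (fun (cr : PySem.Dict Int (List (List (String × Int))) × List (List (String × Int))) p =>
          let pp := pvPpid p
          if pid_map.contains pp = true ∧ pp ≠ pvPid p then (cr.1.modify pp [] (· ++ [p]), cr.2)
          else (cr.1, cr.2 ++ [p]))
        (c, r)).1.getD k []) =
      c.getD k [] ++ ps.filter (fun p => (pid_map.contains (pvPpid p) && (pvPpid p != pvPid p)) && (pvPpid p == k)) := by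
  intro ps
  induction ps with
  | nil => intro c r k; simp
  | cons p ps ih =>
    intro c r k
    rw [List.foldl_cons, List.filter_cons]
    by_cases h1 : pid_map.contains (pvPpid p) = true
    · by_cases h2 : pvPpid p = pvPid p
      · rw [if_neg (fun hc => hc.2 h2), ih]
        simp [h2]
      · rw [if_pos ⟨h1, h2⟩, ih]
        by_cases h3 : pvPpid p = k
        · subst h3
          rw [PySem.Dict.getD_modify_self]
          simp [h1, h2]
        · rw [PySem.Dict.getD_modify_of_ne _ _ _ (Ne.symm h3)]
          simp [h3]
    · rw [if_neg (fun hc => h1 hc.1), ih]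
      have hf : pid_map.contains (pvPpid p) = false := by
        revert h1; cases pid_map.contains (pvPpid p) <;> simp
      simp [hf]

theorem classify_roots (pid_map : PySem.Dict Int (List (String × Int))) :
    ∀ (ps : List (List (String × Int)))
      (c : PySem.Dict Int (List (List (String × Int)))) (r : List (List (String × Int))),
      ((ps.foldl
        (fun (cr : PySem.Dict Int (List (List (String × Int))) × List (List (String × Int))) p =>
          let pp := pvPpid p
          if pid_map.contains pp = true ∧ pp ≠ pvPid p then (cr.1.modify pp [] (· ++ [p]), cr.2)
          else (cr.1, cr.2 ++ [p]))
        (c, r)).2) =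
      r ++ ps.filter (fun p => !(pid_map.contains (pvPpid p) && (pvPpid p != pvPid p))) := by
  intro ps
  induction ps with
  | nil => intro c r; simp
  | cons p ps ih =>
    intro c r
    rw [List.foldl_cons, List.filter_cons]
    by_cases h1 : pid_map.contains (pvPpid p) = true
    · by_cases h2 : pvPpid p = pvPid p
      · rw [if_neg (fun hc => hc.2 h2), ih]
        simp [h2]
      · rw [if_pos ⟨h1, h2⟩, ih]
        simp [h1, h2]
    · rw [if_neg (fun hc => h1 hc.1), ih]
      have hf : pid_map.contains (pvPpid p) = false := by
        revert h1; cases pid_map.contains (pvPpid p) <;> simp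
      simp [hf]

-- the main simulation: B's stack machine equals A's threaded recursion, for EVERY fuel,
-- given that A's buckets at live pids are B's filters and pids identify processes
theorem pvLoopB_eq_pvSeqA (processes : List (List (String × Int)))
    (children : PySem.Dict Int (List (List (String × Int))))
    (Hb : ∀ k, k ∈ processes.map pvPid → children.getD k [] = pvKids processes k)
    (Hglob : ∀ a ∈ processes, ∀ b ∈ processes, pvPid a = pvPid b → a = b) :
    ∀ (f : Nat) (entries : List (List (String × Int) × Int)) (res : List (List (String × Int))),
      (∀ e ∈ entries, e.1 ∈ processes) →
      pvLoopB processes f entries res = (pvSeqA children (f, res) entries).2 := by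
  intro f
  induction f with
  | zero => intro entries res _; rw [pvLoopB, pvSeqA_zero]
  | succ f ih =>
    intro entries res hmem
    match entries with
    | [] => rw [pvLoopB]; rfl
    | (node, level) :: rest =>
      have hnode : node ∈ processes := hmem _ (List.mem_cons_self)
      have hkey : pvPid node ∈ processes.map pvPid := List.mem_map_of_mem hnode
      have hkids : ∀ a ∈ pvKids processes (pvPid node), a ∈ processes := by
        intro a ha; exact List.mem_of_mem_filter ha
      rw [pvLoopB, ih]
      · rw [foldl_cons_rev,
          sorted_true_eq_reverse _ (fun a ha b hb => Hglob a (hkids a ha) b (hkids b hb)),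
          List.map_reverse, List.reverse_reverse]
        have hr : pvSeqA children (f + 1, res) ((node, level) :: rest) =
            pvSeqA children (pvDfsA children (f + 1) node level res) rest := rfl
        rw [hr, pvDfsA_succ, Hb _ hkey]
        unfold pvSeqA
        rw [List.foldl_append]
      · intro e he
        rw [foldl_cons_rev] at he
        rcases List.mem_append.1 he with h | h
        · rcases List.mem_map.1 (List.mem_reverse.1 h) with ⟨c, hc, rfl⟩
          exact hkids c ((PySem.List.sorted_perm _ _ _).subset hc)
        · exact hmem _ (List.mem_cons_of_mem _ h)

-- ===== VERDICT (by name: the statement is the Claim_ definition above) =====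
theorem build_process_tree_spec : Claim_equal_build_process_tree := by
  intro processes _ hpre
  unfold Spec_build_process_tree build_process_tree build_process_tree_alt
  by_cases hemp : processes = []
  · subst hemp; rfl
  · rw [if_neg hemp]
    dsimp only
    set pid_map := processes.foldl (fun d p => d.insert (pvPid p) p) PySem.Dict.empty with hpmdef
    set cr := processes.foldl
      (fun (cr : PySem.Dict Int (List (List (String × Int))) × List (List (String × Int))) p =>
        let pp := pvPpid p
        if pid_map.contains pp = true ∧ pp ≠ pvPid p then (cr.1.modify pp [] (· ++ [p]), cr.2)
        else (cr.1, cr.2 ++ [p]))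
      (PySem.Dict.empty, []) with hcrdef
    have hglob : ∀ a ∈ processes, ∀ b ∈ processes, pvPid a = pvPid b → a = b := by
      intro a ha b hb hk
      by_cases hab : a = b
      · exact hab
      · exact hpre.2.forall (fun p q hpq h => (hpq h.symm).symm) ha hb hab hk
    have hcontains : ∀ k, pid_map.contains k = decide (k ∈ processes.map pvPid) := by
      intro k
      rw [hpmdef, contains_foldl_insert]
      simp
    have hsetc : ∀ k, PySem.Set.contains (PySem.Set.ofList (processes.map pvPid)) k =
        decide (k ∈ processes.map pvPid) := by
      intro k; simp [pysem]
    -- B's roots filter is A's roots list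
    have hroots_eq : processes.filter
        (fun p => !(PySem.Set.contains (PySem.Set.ofList (processes.map pvPid)) (pvPpid p)) ||
          pvPpid p == pvPid p) = cr.2 := by
      rw [hcrdef, classify_roots, List.nil_append]
      apply List.filter_congr
      intro p _
      rw [hsetc, hcontains]
      by_cases h1 : pvPpid p ∈ processes.map pvPid <;> by_cases h2 : pvPpid p = pvPid p <;>
        simp [h1, h2, bne]
    -- A's buckets at live pids are B's filters
    have hb : ∀ k, k ∈ processes.map pvPid → cr.1.getD k [] = pvKids processes k := by
      intro k hk
      rw [hcrdef, classify_getD, PySem.Dict.getD_empty, List.nil_append]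
      unfold pvKids
      apply List.filter_congr
      intro p _
      by_cases h3 : pvPpid p = k
      · subst h3
        rw [hcontains]
        by_cases h2 : pvPpid p = pvPid p <;> simp [hk, h2, bne_comm]
      · have : (pvPpid p == k) = false := by simp [h3]
        simp [this]
    have hroots_mem : ∀ a ∈ cr.2, a ∈ processes := by
      intro a ha
      rw [hcrdef, classify_roots, List.nil_append] at ha
      exact List.mem_of_mem_filter ha
    rw [hroots_eq,
      pvLoopB_eq_pvSeqA processes cr.1 hb hglob _ _ _ (by
        intro e he
        rw [foldl_cons_rev, List.append_nil] at he
        rcases List.mem_map.1 (List.mem_reverse.1 he) with ⟨r, hr, rfl⟩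
        exact hroots_mem r ((PySem.List.sorted_perm _ _ _).subset hr)),
      foldl_cons_rev,
      sorted_true_eq_reverse cr.2 (fun a ha b hb' => hglob a (hroots_mem a ha) b (hroots_mem b hb')),
      List.map_reverse, List.reverse_reverse, List.append_nil]
    unfold pvSeqA
    rw [List.foldl_map]
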